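-- pv_equiv track=rewrite | github.com/jacobsoftware/Effective-algorithms | paying_in_byteland.py | how_many_coins
-- ===== SOURCE A (Python) =====
-- def how_many_coins(value):
--     rest = value
--     i = 0
--     sum_value_of_coins = 0
--     coins = 0
--     while True:
--
--         if rest == 0:
--             return coins
--         else:
--             if rest >= 2**i:
--                 sum_value_of_coins += 2**i
--                 rest = value - sum_value_of_coins
--                 coins += 1
--                 i += 1
--             else:
--                 i -=1
--                 if rest >= 2**i:
--                     sum_value_of_coins += 2**i
--                     rest = value - sum_value_of_coins
--                     coins += 1
-- ===== SOURCE B (Python) =====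
-- def how_many_coins(value):
--     n = value + 1
--     return n.bit_length() + bin(n).count('1') - 2
-- ===== Notes on version B (the rewrite author's own statement) =====
-- stated objective: simpler
-- what changed: Replaces A's up-then-down bit-by-bit greedy scanning loop with a direct closed form over the binary representation of the successor of value: its bit length plus its popcount, minus two; Pre_ excludes negative values, on which A's loop never terminates.
import Mathlib
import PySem

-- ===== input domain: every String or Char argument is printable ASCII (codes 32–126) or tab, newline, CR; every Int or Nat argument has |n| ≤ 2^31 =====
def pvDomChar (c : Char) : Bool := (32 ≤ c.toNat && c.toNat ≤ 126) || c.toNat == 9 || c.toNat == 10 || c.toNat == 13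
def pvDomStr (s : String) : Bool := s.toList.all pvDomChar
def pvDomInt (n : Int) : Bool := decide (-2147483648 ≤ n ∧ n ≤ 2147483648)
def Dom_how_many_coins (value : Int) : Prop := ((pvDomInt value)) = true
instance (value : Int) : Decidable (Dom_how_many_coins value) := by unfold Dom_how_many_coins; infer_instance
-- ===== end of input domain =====

-- B replaces A's up-then-down greedy coin-counting loop with a closed form over the binary
-- representation of the successor of value: its bit length plus its popcount, minus two
-- (objective: simpler). A's loop never terminates on negative input, hence Pre_ excludes those.

-- ===== PORT A =====
-- 2**i; exact for i ≥ 0 (on inputs satisfying Pre_ the loop only evaluates it at i ≥ 0)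
def pvPow2 (i : Int) : Int := 2 ^ i.toNat

-- A's `while True` loop, state (rest, i, sum_value_of_coins, coins). fuel is a pure totality
-- guard: how_many_coins passes more fuel than the loop can iterate on any value ≥ 0, so the
-- `0` branch is never reached there (on negative values Python's loop diverges; Pre_ excludes them).
def pvLoopA (fuel : Nat) (value rest i sumv coins : Int) : Int :=
  match fuel with
  | 0 => coins
  | fuel + 1 =>
    if rest = 0 then coins
    else if pvPow2 i ≤ rest then
      pvLoopA fuel value (value - (sumv + pvPow2 i)) (i + 1) (sumv + pvPow2 i) (coins + 1)
    else if pvPow2 (i - 1) ≤ rest then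
      pvLoopA fuel value (value - (sumv + pvPow2 (i - 1))) (i - 1) (sumv + pvPow2 (i - 1)) (coins + 1)
    else
      pvLoopA fuel value rest (i - 1) sumv coins

def how_many_coins (value : Int) : Int :=
  pvLoopA (2 * value.toNat + 4) value value 0 0 0

-- ===== PORT B =====
-- bin(n).count('1')
def pvPopcount (n : Nat) : Nat :=
  if n = 0 then 0 else n % 2 + pvPopcount (n / 2)
decreasing_by exact Nat.div_lt_self (by omega) (by omega)

-- n.bit_length()
def pvBitLength (n : Nat) : Nat := if n = 0 then 0 else Nat.log2 n + 1

def how_many_coins_alt (value : Int) : Int :=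
  let n := value + 1
  (pvBitLength n.toNat : Int) + (pvPopcount n.toNat : Int) - 2

-- ===== PRECONDITION & SPEC =====
-- Pre_ excludes exactly the negative values, on which A's while-loop never terminates.
def Pre_how_many_coins (value : Int) : Prop := 0 ≤ value
instance (value : Int) : Decidable (Pre_how_many_coins value) := by unfold Pre_how_many_coins; infer_instance
def pvWitness_how_many_coins : Int := 5

def Spec_how_many_coins (value : Int) (out : Int) : Prop := out = how_many_coins_alt value
instance (value : Int) (out : Int) : Decidable (Spec_how_many_coins value out) := by unfold Spec_how_many_coins; infer_instance

-- ===== CLAIM (what is proved, stated in full; the proofs are below) =====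
def Claim_equal_how_many_coins : Prop := ∀ (value : Int), Dom_how_many_coins value → Pre_how_many_coins value → Spec_how_many_coins value (how_many_coins value)

-- ===== LEMMAS AND PROOFS =====

theorem pvPopcount_zero : pvPopcount 0 = 0 := by rw [pvPopcount]; rfl

theorem pvPopcount_step (m : Nat) : pvPopcount m = m % 2 + pvPopcount (m / 2) := by
  rw [pvPopcount]
  split
  · next h => simp [h, pvPopcount_zero]
  · rfl

theorem pvPopcount_top (k : Nat) : ∀ n : Nat, 2 ^ k ≤ n → n < 2 ^ (k + 1) →
    pvPopcount n = pvPopcount (n - 2 ^ k) + 1 := by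
  induction k with
  | zero =>
    intro n h1 h2
    have : n = 1 := by omega
    subst this
    simp [pvPopcount_step 1, pvPopcount_zero]
  | succ k ih =>
    intro n h1 h2
    have hk : (2 : Nat) ^ (k + 1) = 2 * 2 ^ k := by ring
    have hk2 : (2 : Nat) ^ (k + 2) = 2 * 2 ^ (k + 1) := by ring
    have hd1 : 2 ^ k ≤ n / 2 := by omega
    have hd2 : n / 2 < 2 ^ (k + 1) := by omega
    have e1 : pvPopcount n = n % 2 + pvPopcount (n / 2) := pvPopcount_step n
    have e2 : pvPopcount (n - 2 ^ (k + 1)) =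
        (n - 2 ^ (k + 1)) % 2 + pvPopcount ((n - 2 ^ (k + 1)) / 2) := pvPopcount_step _
    have em : (n - 2 ^ (k + 1)) % 2 = n % 2 := by omega
    have ed : (n - 2 ^ (k + 1)) / 2 = n / 2 - 2 ^ k := by omega
    rw [e1, ih (n / 2) hd1 hd2, e2, em, ed]
    ring

theorem pvLoopA_desc (k : Nat) : ∀ (fuel : Nat) (value sumv coins rest : Int),
    k + 1 ≤ fuel → rest = value - sumv → 0 ≤ rest → rest < 2 ^ k →
    pvLoopA fuel value rest (k : Int) sumv coins = coins + pvPopcount rest.toNat := by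
  induction k with
  | zero =>
    intro fuel value sumv coins rest hf h h0 h1
    obtain ⟨f, rfl⟩ : ∃ f, fuel = f + 1 := ⟨fuel - 1, by omega⟩
    have : rest = 0 := by omega
    subst this
    rw [pvLoopA]
    norm_num [pvPopcount_zero]
  | succ k ih =>
    intro fuel value sumv coins rest hf h h0 h1
    obtain ⟨f, rfl⟩ : ∃ f, fuel = f + 1 := ⟨fuel - 1, by omega⟩
    rw [pvLoopA]
    by_cases hz : rest = 0
    · subst hz; norm_num [pvPopcount_zero]
    · have hInat : ((k + 1 : Nat) : Int).toNat = k + 1 := by omega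
      have hpow : pvPow2 ((k + 1 : Nat) : Int) = 2 ^ (k + 1) := by
        simp [pvPow2]
      have hIm1 : ((k + 1 : Nat) : Int) - 1 = ((k : Nat) : Int) := by push_cast; ring
      have hpow1 : pvPow2 ((k : Nat) : Int) = 2 ^ k := by
        simp [pvPow2]
      have h2k1 : (2 : Int) ^ (k + 1) = 2 * 2 ^ k := by ring
      have hnot : ¬ pvPow2 ((k + 1 : Nat) : Int) ≤ rest := by rw [hpow]; omega
      simp only [hz, if_false, hnot, hIm1, hpow1]
      by_cases hge : (2 : Int) ^ k ≤ rest
      · simp only [hge, if_true]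
        rw [ih f value (sumv + 2 ^ k) (coins + 1) (value - (sumv + 2 ^ k)) (by omega) (by ring)
          (by omega) (by omega)]
        have hc : ((2 : Int) ^ k) = ((2 ^ k : Nat) : Int) := by push_cast; ring
        have hc1 : ((2 : Int) ^ (k + 1)) = ((2 ^ (k + 1) : Nat) : Int) := by push_cast; ring
        have hn1 : (2 : Nat) ^ k ≤ rest.toNat := by omega
        have hn2 : rest.toNat < 2 ^ (k + 1) := by omega
        have hpc := pvPopcount_top k rest.toNat hn1 hn2
        have he : (value - (sumv + 2 ^ k)).toNat = rest.toNat - 2 ^ k := by omega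
        rw [he, hpc]
        push_cast
        ring
      · simp only [hge, if_false]
        exact ih f value sumv coins rest (by omega) h h0 (by omega)

theorem pvLoopA_base (value : Int) (k fuel : Nat) (rest sumv : Int)
    (hf : k + 1 ≤ fuel) (h : rest = value - sumv) (hr : rest = value + 1 - 2 ^ k)
    (hlo : (2 : Int) ^ k ≤ value + 1) (hhi : value + 1 < 2 ^ (k + 1)) :
    pvLoopA fuel value rest (k : Int) sumv (k : Int) = how_many_coins_alt value := by
  have hc : ((2 : Int) ^ k) = ((2 ^ k : Nat) : Int) := by push_cast; ring
  have hc1 : ((2 : Int) ^ (k + 1)) = ((2 ^ (k + 1) : Nat) : Int) := by push_cast; ring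
  have h2 : (2 : Nat) ^ (k + 1) = 2 * 2 ^ k := by ring
  have hone : (1 : Nat) ≤ 2 ^ k := Nat.one_le_two_pow
  rw [pvLoopA_desc k fuel value sumv (k : Int) rest hf h (by omega) (by omega)]
  set N : Nat := (value + 1).toNat with hN
  have hNv : ((N : Int)) = value + 1 := by omega
  have hn1 : 2 ^ k ≤ N := by omega
  have hn2 : N < 2 ^ (k + 1) := by omega
  have hNne : N ≠ 0 := by omega
  have hlog : Nat.log2 N = k := by
    rw [Nat.log2_eq_log_two]
    exact Nat.log_eq_of_pow_le_of_lt_pow hn1 hn2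
  have hpc : pvPopcount N = pvPopcount (N - 2 ^ k) + 1 := pvPopcount_top k N hn1 hn2
  have hrt : rest.toNat = N - 2 ^ k := by omega
  simp only [how_many_coins_alt, pvBitLength, ← hN, hNne, if_false, hlog, hpc, hrt]
  push_cast
  omega

theorem pvLoopA_asc (d : Nat) : ∀ (value : Int) (k fuel : Nat) (rest sumv : Int),
    2 * d + k + 1 ≤ fuel → rest = value - sumv →
    rest = value + 1 - 2 ^ k → sumv = 2 ^ k - 1 →
    (2 : Int) ^ k ≤ value + 1 → value + 1 < 2 ^ (k + d + 1) →
    pvLoopA fuel value rest (k : Int) sumv (k : Int) = how_many_coins_alt value := by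
  induction d with
  | zero =>
    intro value k fuel rest sumv hf h hr hs hlo hhi
    exact pvLoopA_base value k fuel rest sumv (by omega) h hr hlo (by simpa using hhi)
  | succ d ih =>
    intro value k fuel rest sumv hf h hr hs hlo hhi
    by_cases hcase : value + 1 < 2 ^ (k + 1)
    · exact pvLoopA_base value k fuel rest sumv (by omega) h hr hlo hcase
    · obtain ⟨f, rfl⟩ : ∃ f, fuel = f + 1 := ⟨fuel - 1, by omega⟩
      rw [pvLoopA]
      have hp : pvPow2 ((k : Nat) : Int) = 2 ^ k := by simp [pvPow2]
      have h2k1 : (2 : Int) ^ (k + 1) = 2 * 2 ^ k := by ring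
      have hone : (0 : Int) < 2 ^ k := by positivity
      have hz : ¬ rest = 0 := by omega
      have hge : (2 : Int) ^ k ≤ rest := by omega
      simp only [hz, if_false, hp, hge, if_true]
      have hIk1 : ((k : Nat) : Int) + 1 = ((k + 1 : Nat) : Int) := by push_cast; ring
      rw [hIk1]
      have h2k1' : (2 : Int) ^ (k + 1) = 2 ^ k + 2 ^ k := by ring
      exact ih value (k + 1) f _ _ (by omega) (by ring) (by omega) (by omega) (by omega)
        (by have : k + 1 + d + 1 = k + (d + 1) + 1 := by ring
            rw [this]; exact hhi)

-- ===== VERDICT (by name: the statement is the Claim_ definition above) =====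
theorem how_many_coins_spec : Claim_equal_how_many_coins := by
  intro value _ hpre
  unfold Spec_how_many_coins how_many_coins
  have h0 : (0 : Int) ≤ value := hpre
  have h1 : value.toNat < 2 ^ value.toNat := Nat.lt_two_pow_self
  have h2 : (2 : Nat) ^ (value.toNat + 1) = 2 * 2 ^ value.toNat := by ring
  have hc : ((2 ^ (value.toNat + 1) : Nat) : Int) = 2 ^ (value.toNat + 1) := by push_cast; ring
  have hbound : value + 1 < 2 ^ (0 + value.toNat + 1) := by
    simp only [Nat.zero_add]
    omega
  have := pvLoopA_asc value.toNat value 0 (2 * value.toNat + 4) value 0 (by omega) (by ring)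
    (by norm_num) (by norm_num) (by simpa using h0) hbound
  simpa using this
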